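-- pv_equiv track=rewrite | github.com/Geetie/gpu_profiling_system | src/infrastructure/probing/clock_measurement.py | _wrap_with_events
-- ===== SOURCE A (Python) =====
-- def _wrap_with_events(original_source: str) -> str | None:
--     """Wrap the original kernel source with cudaEventElapsedTime timing.
--
--     Inserts cudaEventRecord before and after the LAST kernel launch line
--     (not the first), so that if the kernel has a warmup launch, we time
--     the actual measurement launch instead.
--     """
--     lines = original_source.split("\n")
--
--     # First pass: find the last kernel launch index
--     last_launch_idx = -1
--     for i, line in enumerate(lines):
--         if "<<<" in line and ">>>" in line:
--             last_launch_idx = i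
--
--     if last_launch_idx < 0:
--         return None
--
--     # Second pass: inject event timing at the last launch
--     new_lines = []
--     for i, line in enumerate(lines):
--         if i == last_launch_idx:
--             new_lines.append('    cudaEvent_t evt_start, evt_stop;')
--             new_lines.append('    cudaEventCreate(&evt_start);')
--             new_lines.append('    cudaEventCreate(&evt_stop);')
--             new_lines.append('    cudaEventRecord(evt_start);')
--             new_lines.append(line)  # original kernel launch
--             new_lines.append('    cudaEventRecord(evt_stop);')
--             new_lines.append('    cudaEventSynchronize(evt_stop);')
--             new_lines.append('    float elapsed_ms;')
--             new_lines.append('    cudaEventElapsedTime(&elapsed_ms, evt_start, evt_stop);')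
--             new_lines.append('    printf("elapsed_time_ms: %.4f\\n", elapsed_ms);')
--             new_lines.append('    cudaEventDestroy(evt_start);')
--             new_lines.append('    cudaEventDestroy(evt_stop);')
--         else:
--             new_lines.append(line)
--
--     return "\n".join(new_lines)
-- ===== SOURCE B (Python) =====
-- _PRE = [
--     '    cudaEvent_t evt_start, evt_stop;',
--     '    cudaEventCreate(&evt_start);',
--     '    cudaEventCreate(&evt_stop);',
--     '    cudaEventRecord(evt_start);',
-- ]
-- _POST = [
--     '    cudaEventRecord(evt_stop);',
--     '    cudaEventSynchronize(evt_stop);',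
--     '    float elapsed_ms;',
--     '    cudaEventElapsedTime(&elapsed_ms, evt_start, evt_stop);',
--     '    printf("elapsed_time_ms: %.4f\\n", elapsed_ms);',
--     '    cudaEventDestroy(evt_start);',
--     '    cudaEventDestroy(evt_stop);',
-- ]
--
-- def _wrap_with_events(original_source: str) -> str | None:
--     # ONE backward pass that builds the output back-to-front with a flag:
--     # no launch index is ever computed and no line is revisited.
--     out = []
--     found = False
--     for line in reversed(original_source.split("\n")):
--         if not found and "<<<" in line and ">>>" in line:
--             out.extend(reversed(_POST))
--             out.append(line)
--             out.extend(reversed(_PRE))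
--             found = True
--         else:
--             out.append(line)
--     if not found:
--         return None
--     out.reverse()
--     return "\n".join(out)
-- ===== Notes on version B (the rewrite author's own statement) =====
-- stated objective: alternative
-- what changed: B replaces A's two staged forward passes (a full scan computing the last launch index, then a rebuild loop comparing every index against it) with a single backward pass carrying a found-flag that splices the event blocks around the first launch it meets and builds the whole output back-to-front, never computing or comparing an index.
import Mathlib
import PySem

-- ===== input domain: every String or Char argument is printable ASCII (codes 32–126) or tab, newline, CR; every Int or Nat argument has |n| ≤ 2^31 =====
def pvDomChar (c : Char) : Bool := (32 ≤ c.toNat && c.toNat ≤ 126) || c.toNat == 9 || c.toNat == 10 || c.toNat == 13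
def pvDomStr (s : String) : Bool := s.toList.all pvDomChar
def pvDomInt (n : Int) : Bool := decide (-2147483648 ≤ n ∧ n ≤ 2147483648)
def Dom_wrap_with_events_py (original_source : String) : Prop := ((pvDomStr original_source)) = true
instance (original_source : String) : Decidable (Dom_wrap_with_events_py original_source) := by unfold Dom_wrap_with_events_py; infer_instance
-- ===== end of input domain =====

-- B is an alternative decomposition: one backward pass with a found-flag building the output
-- back-to-front, instead of A's two forward passes (index search, then index-compare rebuild).
-- Return values proved equal; same O(n) cost.

-- a line contains a kernel launch: '<<<' in line and '>>>' in line
def wweIsLaunch (line : String) : Bool :=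
  PySem.Str.isIn "<<<" line && PySem.Str.isIn ">>>" line

-- the fixed lines inserted before the launch line
def wwePre : List String :=
  [ "    cudaEvent_t evt_start, evt_stop;",
    "    cudaEventCreate(&evt_start);",
    "    cudaEventCreate(&evt_stop);",
    "    cudaEventRecord(evt_start);" ]

-- the fixed lines inserted after the launch line
def wwePost : List String :=
  [ "    cudaEventRecord(evt_stop);",
    "    cudaEventSynchronize(evt_stop);",
    "    float elapsed_ms;",
    "    cudaEventElapsedTime(&elapsed_ms, evt_start, evt_stop);",
    "    printf(\"elapsed_time_ms: %.4f\\n\", elapsed_ms);",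
    "    cudaEventDestroy(evt_start);",
    "    cudaEventDestroy(evt_stop);" ]

-- ===== PORT A =====
def wrap_with_events_py (original_source : String) : Option String :=
  let lines := (PySem.Str.split? original_source "\n").getD []
  -- first pass: find the last kernel launch index
  let last_launch_idx : Int :=
    (PySem.List.enumerate lines).foldl
      (fun acc p => if wweIsLaunch p.2 then p.1 else acc) (-1)
  if last_launch_idx < 0 then none
  else
    -- second pass: inject event timing at the last launch
    let new_lines :=
      (PySem.List.enumerate lines).foldl
        (fun acc p =>
          if p.1 = last_launch_idx then acc ++ wwePre ++ [p.2] ++ wwePost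
          else acc ++ [p.2]) []
    some (PySem.Str.join "\n" new_lines)

-- ===== PORT B =====
-- the loop body: appends to the output (built back-to-front) and updates the found-flag
def wweStep (acc : List String × Bool) (line : String) : List String × Bool :=
  if !acc.2 && wweIsLaunch line then
    (acc.1 ++ wwePost.reverse ++ [line] ++ wwePre.reverse, true)
  else (acc.1 ++ [line], acc.2)

def wrap_with_events_py_alt (original_source : String) : Option String :=
  let lines := (PySem.Str.split? original_source "\n").getD []
  let r := lines.reverse.foldl wweStep ([], false)
  if r.2 then some (PySem.Str.join "\n" r.1.reverse) else none

-- ===== PRECONDITION & SPEC =====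
def Spec_wrap_with_events_py (original_source : String) (out : Option String) : Prop := out = wrap_with_events_py_alt original_source
instance (original_source : String) (out : Option String) : Decidable (Spec_wrap_with_events_py original_source out) := by unfold Spec_wrap_with_events_py; infer_instance

-- ===== CLAIM (what is proved, stated in full; the proofs are below) =====
def Claim_equal_wrap_with_events_py : Prop := ∀ (original_source : String), Dom_wrap_with_events_py original_source → Spec_wrap_with_events_py original_source (wrap_with_events_py original_source)

-- ===== LEMMAS AND PROOFS =====

-- index of the FIRST launch line (proof-only characterisation of B's backward scan)
def wweFind : List String → Option Nat
  | [] => none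
  | h :: t => if wweIsLaunch h then some 0 else (wweFind t).map (· + 1)

theorem wweFind_lt (l : List String) (j : Nat) (h : wweFind l = some j) : j < l.length := by
  induction l generalizing j with
  | nil => simp [wweFind] at h
  | cons x t ih =>
      rw [wweFind] at h
      split at h
      · injection h with h; simp only [List.length_cons]; omega
      · cases ht : wweFind t with
        | none => simp [ht] at h
        | some k =>
            simp only [ht, Option.map_some, Option.some.injEq] at h
            have := ih k ht
            simp only [List.length_cons]
            omega

-- once the flag is set, the loop just copies the remaining lines
theorem wweLoopT (r acc : List String) :
    r.foldl wweStep (acc, true) = (acc ++ r, true) := by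
  induction r generalizing acc with
  | nil => simp
  | cons h t ih => simp [wweStep, ih]

-- before the flag is set, the loop's result is described by the first launch index
theorem wweLoopF (r acc : List String) :
    r.foldl wweStep (acc, false) =
      (match wweFind r with
       | none => (acc ++ r, false)
       | some j => (acc ++ r.take j ++ wwePost.reverse ++ [r.getD j ""] ++ wwePre.reverse
                      ++ r.drop (j + 1), true)) := by
  induction r generalizing acc with
  | nil => simp [wweFind]
  | cons h t ih =>
      by_cases hc : wweIsLaunch h = true
      · simp [wweFind, hc, wweStep, wweLoopT]
      · rw [List.foldl_cons, show wweStep (acc, false) h = (acc ++ [h], false) by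
          simp [wweStep, hc], ih]
        cases ht : wweFind t with
        | none => simp [wweFind, hc, ht]
        | some j => simp [wweFind, hc, ht, List.take_succ_cons, List.drop_succ_cons]

-- A's first pass computes the index that B's backward scan stops at
theorem wweLast_eq (l : List String) :
    (PySem.List.enumerate l).foldl (fun acc p => if wweIsLaunch p.2 then p.1 else acc) (-1)
      = (match wweFind l.reverse with
         | none => (-1 : Int)
         | some j => ((l.length - 1 - j : Nat) : Int)) := by
  induction l using List.reverseRecOn with
  | nil => rfl
  | append_singleton l x ih =>
      rw [PySem.List.enumerate_append, List.foldl_append, ih]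
      by_cases hc : wweIsLaunch x = true
      · simp [PySem.List.enumerate, wweFind, hc]
      · rw [List.reverse_append]
        cases ht : wweFind l.reverse with
        | none => simp [PySem.List.enumerate, wweFind, hc, ht]
        | some j =>
            have hj : j < l.length := by
              have := wweFind_lt _ _ ht; simpa using this
            simp only [List.reverse_singleton, List.singleton_append, wweFind, hc,
              Bool.false_eq_true, if_false, ht, Option.map_some]
            simp [PySem.List.enumerate, hc]
            omega

-- A's rebuild loop is the splice of the fixed blocks around the line at index i
theorem wweBuild_eq (l : List String) (i : Nat) (hi : i < l.length) :
    (PySem.List.enumerate l).foldl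
      (fun acc p => if p.1 = (i : Int) then acc ++ wwePre ++ [p.2] ++ wwePost else acc ++ [p.2]) []
      = l.take i ++ wwePre ++ [l.getD i ""] ++ wwePost ++ l.drop (i + 1) := by
  induction l using List.reverseRecOn with
  | nil => simp at hi
  | append_singleton l x ih =>
      rw [PySem.List.enumerate_append, List.foldl_append]
      rcases Nat.lt_or_ge i l.length with h | h
      · have hne : ¬((l.length : Int) = (i : Int)) := by
          intro hcon; omega
        rw [ih h]
        simp [PySem.List.enumerate, hne, List.getElem?_append_left h,
          List.take_append_of_le_length (by omega : i ≤ l.length),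
          List.drop_append_of_le_length (by omega : i + 1 ≤ l.length)]
      · have hi' : i = l.length := by
          simp only [List.length_append, List.length_singleton] at hi; omega
        subst hi'
        have hmain : (PySem.List.enumerate l 0).foldl
            (fun acc p => if p.1 = (l.length : Int) then acc ++ wwePre ++ [p.2] ++ wwePost
                          else acc ++ [p.2]) ([] : List String) = l := by
          rw [PySem.List.foldl_congr_mem _ _ (fun acc p => acc ++ [p.2]) []
            (by
              intro acc p hp
              rcases (PySem.List.mem_enumerate_iff l 0 p).1 hp with ⟨k, hk, hpk⟩
              have : ¬(p.1 = (l.length : Int)) := by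
                subst hpk; simp; omega
              simp [this])]
          have hmap := PySem.List.foldl_append_singleton_eq_map (fun p : Int × String => p.2)
            (PySem.List.enumerate l 0) []
          simpa [PySem.List.map_snd_enumerate] using hmap
        rw [hmain]
        simp [PySem.List.enumerate]

-- reversing B's back-to-front output at hit j yields A's splice at i = len - 1 - j
theorem wweRevOut (l : List String) (j : Nat) (hj : j < l.length) :
    (l.reverse.take j ++ wwePost.reverse ++ [l.reverse.getD j ""] ++ wwePre.reverse
       ++ l.reverse.drop (j + 1)).reverse
      = l.take (l.length - 1 - j) ++ wwePre ++ [l.getD (l.length - 1 - j) ""] ++ wwePost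
          ++ l.drop (l.length - 1 - j + 1) := by
  have h1 : (l.reverse.drop (j + 1)).reverse = l.take (l.length - 1 - j) := by
    rw [List.drop_reverse, List.reverse_reverse]
    congr 1
    omega
  have h2 : (l.reverse.take j).reverse = l.drop (l.length - 1 - j + 1) := by
    rw [List.take_reverse, List.reverse_reverse]
    congr 1
    omega
  have h3 : l.reverse.getD j "" = l.getD (l.length - 1 - j) "" := by
    simp only [List.getD, List.getElem?_reverse hj]
  simp only [List.reverse_append, List.reverse_reverse, List.reverse_singleton, h1, h2, h3]
  simp

-- ===== VERDICT (by name: the statement is the Claim_ definition above) =====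
theorem wrap_with_events_py_spec : Claim_equal_wrap_with_events_py := by
  intro s _
  unfold Spec_wrap_with_events_py wrap_with_events_py wrap_with_events_py_alt
  simp only [wweLast_eq, wweLoopF]
  cases h : wweFind ((PySem.Str.split? s "\n").getD []).reverse with
  | none => simp
  | some j =>
      have hj : j < ((PySem.Str.split? s "\n").getD []).length := by
        have := wweFind_lt _ _ h; simpa using this
      simp only
      rw [if_neg (by omega : ¬(((((PySem.Str.split? s "\n").getD []).length - 1 - j : Nat) : Int) < 0))]
      have hi : ((((PySem.Str.split? s "\n").getD []).length - 1 - j : Nat)) <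
          ((PySem.Str.split? s "\n").getD []).length := by omega
      rw [wweBuild_eq _ _ hi]
      simp only [List.nil_append]
      rw [wweRevOut _ _ hj]
      simp
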